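-- pv_equiv track=rewrite | github.com/skestral/lynxposter | app/adapters/__init__.py | destination_configured
-- ===== SOURCE A (Python) =====
-- from typing import Any
--
-- def destination_configured(service: str, credentials: dict[str, Any]) -> bool:
--     if service == "bluesky":
--         return bool(credentials.get("session_string") or (credentials.get("handle") and credentials.get("password")))
--     if service == "instagram":
--         return bool(credentials.get("instagrapi_sessionid") or (credentials.get("instagrapi_username") and credentials.get("instagrapi_password")))
--     if service == "mastodon":
--         return bool(credentials.get("instance") and credentials.get("token"))
--     if service == "twitter":
--         required = ("app_key", "app_secret", "access_token", "access_token_secret")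
--         return all(credentials.get(key) for key in required)
--     if service == "discord":
--         return bool(credentials.get("webhook_url"))
--     if service == "telegram":
--         return bool(credentials.get("bot_token") and credentials.get("channel_id"))
--     if service == "tumblr":
--         required = ("consumer_key", "consumer_secret", "oauth_token", "oauth_secret", "blog_name")
--         return all(credentials.get(key) for key in required)
--     return False
-- ===== SOURCE B (Python) =====
-- TABLE = {
--     "bluesky": [("session_string",), ("handle", "password")],
--     "instagram": [("instagrapi_sessionid",), ("instagrapi_username", "instagrapi_password")],
--     "mastodon": [("instance", "token")],
--     "twitter": [("app_key", "app_secret", "access_token", "access_token_secret")],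
--     "discord": [("webhook_url",)],
--     "telegram": [("bot_token", "channel_id")],
--     "tumblr": [("consumer_key", "consumer_secret", "oauth_token", "oauth_secret", "blog_name")],
-- }
--
-- def destination_configured(service: str, credentials: dict) -> bool:
--     return any(all(credentials.get(k) for k in group) for group in TABLE.get(service, ()))
-- ===== Notes on version B (the rewrite author's own statement) =====
-- stated objective: simpler
-- what changed: Replaces the seven-way if-chain of hand-written boolean expressions with a module-level table mapping each service to its credential-key groups (OR of ANDs), evaluated by one generic any/all lookup.
import Mathlib
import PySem

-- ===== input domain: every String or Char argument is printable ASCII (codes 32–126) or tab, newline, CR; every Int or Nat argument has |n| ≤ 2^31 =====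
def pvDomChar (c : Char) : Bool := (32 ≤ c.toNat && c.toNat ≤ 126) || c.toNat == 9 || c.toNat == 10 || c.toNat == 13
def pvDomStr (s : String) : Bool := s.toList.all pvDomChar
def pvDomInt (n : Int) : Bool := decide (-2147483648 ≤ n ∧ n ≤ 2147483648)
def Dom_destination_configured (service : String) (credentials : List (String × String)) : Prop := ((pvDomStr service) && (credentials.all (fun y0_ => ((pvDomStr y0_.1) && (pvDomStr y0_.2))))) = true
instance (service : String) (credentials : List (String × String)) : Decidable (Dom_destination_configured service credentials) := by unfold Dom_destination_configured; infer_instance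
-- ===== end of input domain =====

-- B replaces A's seven-way if-chain with a table of credential-key groups and one any/all traversal (simpler).

-- truthiness of credentials.get(k): some non-empty string
def pvGetTruthy (credentials : List (String × String)) (k : String) : Bool :=
  match (PySem.Dict.mk credentials).get? k with
  | none => false
  | some s => !(s == "")

-- ===== PORT A =====
def destination_configured (service : String) (credentials : List (String × String)) : Bool :=
  if service == "bluesky" then
    pvGetTruthy credentials "session_string" || (pvGetTruthy credentials "handle" && pvGetTruthy credentials "password")
  else if service == "instagram" then
    pvGetTruthy credentials "instagrapi_sessionid" || (pvGetTruthy credentials "instagrapi_username" && pvGetTruthy credentials "instagrapi_password")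
  else if service == "mastodon" then
    pvGetTruthy credentials "instance" && pvGetTruthy credentials "token"
  else if service == "twitter" then
    ["app_key", "app_secret", "access_token", "access_token_secret"].all (fun k => pvGetTruthy credentials k)
  else if service == "discord" then
    pvGetTruthy credentials "webhook_url"
  else if service == "telegram" then
    pvGetTruthy credentials "bot_token" && pvGetTruthy credentials "channel_id"
  else if service == "tumblr" then
    ["consumer_key", "consumer_secret", "oauth_token", "oauth_secret", "blog_name"].all (fun k => pvGetTruthy credentials k)
  else false

-- ===== PORT B =====
def pvTable : PySem.Dict String (List (List String)) := PySem.Dict.mk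
  [ ("bluesky", [["session_string"], ["handle", "password"]]),
    ("instagram", [["instagrapi_sessionid"], ["instagrapi_username", "instagrapi_password"]]),
    ("mastodon", [["instance", "token"]]),
    ("twitter", [["app_key", "app_secret", "access_token", "access_token_secret"]]),
    ("discord", [["webhook_url"]]),
    ("telegram", [["bot_token", "channel_id"]]),
    ("tumblr", [["consumer_key", "consumer_secret", "oauth_token", "oauth_secret", "blog_name"]]) ]

def destination_configured_alt (service : String) (credentials : List (String × String)) : Bool :=
  (pvTable.getD service []).any (fun group => group.all (fun k => pvGetTruthy credentials k))

-- ===== PRECONDITION & SPEC =====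
def Spec_destination_configured (service : String) (credentials : List (String × String)) (out : Bool) : Prop := out = destination_configured_alt service credentials
instance (service : String) (credentials : List (String × String)) (out : Bool) : Decidable (Spec_destination_configured service credentials out) := by unfold Spec_destination_configured; infer_instance

-- ===== CLAIM (what is proved, stated in full; the proofs are below) =====
def Claim_equal_destination_configured : Prop := ∀ (service : String) (credentials : List (String × String)), Dom_destination_configured service credentials → Spec_destination_configured service credentials (destination_configured service credentials)

-- ===== LEMMAS AND PROOFS =====

-- ===== VERDICT (by name: the statement is the Claim_ definition above) =====
theorem destination_configured_spec : Claim_equal_destination_configured := by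
  intro service credentials _
  unfold Spec_destination_configured destination_configured destination_configured_alt pvTable
  simp only [PySem.Dict.getD, PySem.Dict.get?, beq_iff_eq]
  split_ifs with h1 h2 h3 h4 h5 h6 h7
  · subst h1; simp [List.find?]
  · subst h2; simp [List.find?]
  · subst h3; simp [List.find?]
  · subst h4; simp [List.find?]
  · subst h5; simp [List.find?]
  · subst h6; simp [List.find?]
  · subst h7; simp [List.find?]
  · simp [List.find?, beq_eq_false_iff_ne.mpr (Ne.symm h1), beq_eq_false_iff_ne.mpr (Ne.symm h2),
      beq_eq_false_iff_ne.mpr (Ne.symm h3), beq_eq_false_iff_ne.mpr (Ne.symm h4),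
      beq_eq_false_iff_ne.mpr (Ne.symm h5), beq_eq_false_iff_ne.mpr (Ne.symm h6),
      beq_eq_false_iff_ne.mpr (Ne.symm h7)]
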